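-- pv_equiv track=rewrite | github.com/Yawn-Sean/Daily_CF_Problems | daily_problems/2025/04/0412/personal_submission/cf605a_liryc.py | solve
-- ===== SOURCE A (Python) =====
-- def solve(n: int, a: list[int]) -> int:
--     dp = [-1] * n
--     m = 1
--     for x in a:
--         y = x - 1
--         if y and dp[y - 1] > 0:
--             dp[y] = dp[y - 1] + 1
--             m = max(m, dp[y])
--         else:
--             dp[y] = 1
--     return n - m
-- ===== SOURCE B (Python) =====
-- def solve(n: int, a: list[int]) -> int:
--     # stage 1: build a predecessor forest over positions:
--     # parent[j] = index of the last previous write to the cell a[j]-2 (None = root)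
--     last = [None] * n
--     parent = []
--     for j, x in enumerate(a):
--         parent.append(last[x - 2] if x != 1 else None)
--         last[x - 1] = j
--     # stage 2: longest root-to-node path in the forest
--     depth = []
--     m = 1
--     for j in range(len(a)):
--         p = parent[j]
--         d = 1 if p is None else depth[p] + 1
--         depth.append(d)
--         if d > m:
--             m = d
--     return n - m
-- ===== Notes on version B (the rewrite author's own statement) =====
-- stated objective: alternative
-- what changed: A is a single pass keeping chain lengths in a dp array keyed by value cell with a running max; B is two staged passes: it first materialises a predecessor forest over positions (parent[j] = last write index to cell a[j]-2, via a last-write-index table), then computes the maximum root-to-node depth of that forest in a second pass over positions.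
import Mathlib
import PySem

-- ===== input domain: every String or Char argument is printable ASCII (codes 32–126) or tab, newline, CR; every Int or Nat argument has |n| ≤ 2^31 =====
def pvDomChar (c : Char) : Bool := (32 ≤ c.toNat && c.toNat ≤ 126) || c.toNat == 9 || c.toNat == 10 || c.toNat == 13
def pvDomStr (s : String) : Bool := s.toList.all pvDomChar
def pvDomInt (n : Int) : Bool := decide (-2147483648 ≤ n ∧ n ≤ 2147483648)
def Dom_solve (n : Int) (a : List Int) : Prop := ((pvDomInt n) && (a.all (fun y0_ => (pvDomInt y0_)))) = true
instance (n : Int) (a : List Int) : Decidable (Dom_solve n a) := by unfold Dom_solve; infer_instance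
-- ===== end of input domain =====

-- B replaces A's one-pass chain DP (dp array keyed by value cell, running max) by two staged
-- passes: it first materialises a predecessor forest over positions, then computes the maximum
-- root-to-node depth of that forest (objective: alternative algorithm, same cost).

-- ===== PORT A =====
-- one step of A's 'for x in a' loop over the state (dp, m)
def solveStepA (st : List Int × Int) (x : Int) : List Int × Int :=
  let dp := st.1
  let m := st.2
  let y := x - 1
  if y ≠ 0 ∧ PySem.List.pyGetD dp (y - 1) 0 > 0 then
    let v := PySem.List.pyGetD dp (y - 1) 0 + 1
    (PySem.List.pySetD dp y v, max m v)
  else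
    (PySem.List.pySetD dp y 1, m)

def solve (n : Int) (a : List Int) : Int :=
  let st := a.foldl solveStepA (List.replicate n.toNat (-1), 1)
  n - st.2

-- ===== PORT B =====
-- one step of B's 'for j, x in enumerate(a)' loop over the state (last, parent)
def pass1Step (st : List (Option Int) × List (Option Int)) (jx : Int × Int) :
    List (Option Int) × List (Option Int) :=
  let last := st.1
  let parent := st.2
  let j := jx.1
  let x := jx.2
  let parent' := parent ++ [if x ≠ 1 then PySem.List.pyGetD last (x - 2) none else none]
  (PySem.List.pySetD last (x - 1) (some j), parent')

-- one step of B's 'for j in range(len(a))' loop over the state (depth, m)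
def pass2Step (parent : List (Option Int)) (st : List Int × Int) (j : Int) : List Int × Int :=
  let depth := st.1
  let m := st.2
  let d : Int := match PySem.List.pyGetD parent j none with
    | none => 1
    | some q => PySem.List.pyGetD depth q 0 + 1
  (depth ++ [d], if d > m then d else m)

def solve_alt (n : Int) (a : List Int) : Int :=
  let st1 := (PySem.List.enumerate a 0).foldl pass1Step (List.replicate n.toNat none, [])
  let st2 := (PySem.List.pyRange 0 (a.length : Int) 1).foldl (pass2Step st1.2) ([], 1)
  n - st2.2

-- ===== PRECONDITION & SPEC =====
-- Pre_ is exactly the set of inputs on which A returns normally: on a nonempty list A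
-- raises IndexError as soon as some element gives an index outside [-n, n-1].
def Pre_solve (n : Int) (a : List Int) : Prop :=
  a = [] ∨ (1 ≤ n ∧ ∀ x ∈ a, 2 - n ≤ x ∧ x ≤ n)
instance (n : Int) (a : List Int) : Decidable (Pre_solve n a) := by unfold Pre_solve; infer_instance

def pvWitness_solve : Int × List Int := (4, [2, 4, 3, 1])

def Spec_solve (n : Int) (a : List Int) (out : Int) : Prop := out = solve_alt n a
instance (n : Int) (a : List Int) (out : Int) : Decidable (Spec_solve n a out) := by unfold Spec_solve; infer_instance

-- ===== CLAIM (what is proved, stated in full; the proofs are below) =====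
def Claim_equal_solve : Prop := ∀ (n : Int) (a : List Int), Dom_solve n a → Pre_solve n a → Spec_solve n a (solve n a)

-- ===== LEMMAS AND PROOFS =====

-- depth of position j in the forest described by the parent list P (roots have depth 1)
def depthF (P : List (Option Int)) (j : Nat) : Int :=
  match P.getD j none with
  | none => 1
  | some p => if h : p.toNat < j then depthF P p.toNat + 1 else 1
termination_by j

lemma depthF_none (P : List (Option Int)) (j : Nat) (hp : P.getD j none = none) :
    depthF P j = 1 := by rw [depthF, hp]

lemma depthF_some (P : List (Option Int)) (j : Nat) (p : Int) (hp : P.getD j none = some p) :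
    depthF P j = if p.toNat < j then depthF P p.toNat + 1 else 1 := by
  rw [depthF, hp]
  simp only []
  split_ifs with h <;> rfl

-- every stored parent points to a strictly earlier position
def Backward (P : List (Option Int)) : Prop :=
  ∀ (k : Nat) (p : Int), P.getD k none = some p → 0 ≤ p ∧ p.toNat < k

lemma depthF_pos (P : List (Option Int)) : ∀ j, 1 ≤ depthF P j := by
  intro j
  induction j using Nat.strong_induction_on with
  | _ j ih =>
    cases hp : P.getD j none with
    | none => rw [depthF_none P j hp]
    | some p =>
      rw [depthF_some P j p hp]
      by_cases h : p.toNat < j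
      · rw [if_pos h]
        have := ih p.toNat h
        omega
      · rw [if_neg h]

lemma depthF_append (P Q : List (Option Int)) (hB : Backward P) :
    ∀ j, j < P.length → depthF (P ++ Q) j = depthF P j := by
  intro j
  induction j using Nat.strong_induction_on with
  | _ j ih =>
    intro hj
    have hget : (P ++ Q).getD j none = P.getD j none := by
      rw [List.getD_eq_getElem?_getD, List.getElem?_append_left hj, ← List.getD_eq_getElem?_getD]
    cases hp : P.getD j none with
    | none => rw [depthF_none P j hp, depthF_none (P ++ Q) j (by rw [hget, hp])]
    | some p =>
      have hb := hB j p hp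
      rw [depthF_some P j p hp, depthF_some (P ++ Q) j p (by rw [hget, hp]),
        if_pos hb.2, if_pos hb.2, ih p.toNat hb.2 (by omega)]

-- Python's % is fmod; for a divisor n ≥ 1 it agrees with the Euclidean emod
lemma pymod_eq_emod (i n : Int) (hn : 1 ≤ n) : PySem.Int.mod i n = i % n := by
  unfold PySem.Int.mod
  rw [Int.fmod_eq_emod, if_pos (Or.inl (by omega)), add_zero]

-- a Python index i ∈ [-n, n-1] into a list of length n addresses cell (i % n)
lemma pyIdx_mod (len : Nat) (n i : Int) (hlen : (len : Int) = n) (hn : 1 ≤ n)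
    (hlo : -n ≤ i) (hhi : i < n) :
    PySem.List.pyIdx? len i = some (PySem.Int.mod i n).toNat := by
  rw [pymod_eq_emod i n hn]
  by_cases h0 : 0 ≤ i
  · have hmod : i % n = i := Int.emod_eq_of_lt h0 hhi
    unfold PySem.List.pyIdx?
    rw [if_pos h0, if_pos (by omega)]
    congr 1
    omega
  · have hmod : i % n = i + n := by
      rw [← Int.add_emod_right, Int.emod_eq_of_lt (by omega) (by omega)]
    unfold PySem.List.pyIdx?
    rw [if_neg h0, if_pos (by omega)]
    congr 1
    omega

lemma pyGetD_mod {α : Type} (dp : List α) (d : α) (n i : Int) (hlen : (dp.length : Int) = n)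
    (hn : 1 ≤ n) (hlo : -n ≤ i) (hhi : i < n) :
    PySem.List.pyGetD dp i d = dp.getD (PySem.Int.mod i n).toNat d := by
  unfold PySem.List.pyGetD PySem.List.pyGet?
  rw [pyIdx_mod dp.length n i hlen hn hlo hhi, List.getD_eq_getElem?_getD]
  rfl

lemma pySetD_mod {α : Type} (dp : List α) (n i : Int) (v : α) (hlen : (dp.length : Int) = n)
    (hn : 1 ≤ n) (hlo : -n ≤ i) (hhi : i < n) :
    PySem.List.pySetD dp i v = dp.set (PySem.Int.mod i n).toNat v := by
  unfold PySem.List.pySetD PySem.List.pySet?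
  rw [pyIdx_mod dp.length n i hlen hn hlo hhi]
  rfl

lemma pymod_lt (i n : Int) (hn : 1 ≤ n) : (PySem.Int.mod i n).toNat < n.toNat := by
  rw [pymod_eq_emod i n hn]
  have h1 := Int.emod_nonneg i (by omega : n ≠ 0)
  have h2 := Int.emod_lt_of_pos i (by omega : 0 < n)
  omega

-- the cell invariant tying A's dp to B's last-write table and parent forest
def CellInv (n : Int) (dp : List Int) (last parent : List (Option Int)) : Prop :=
  ∀ c : Nat, c < n.toNat →
    (last.getD c none = none ∧ dp.getD c 0 = -1) ∨
    (∃ i : Nat, i < parent.length ∧ last.getD c none = some (i : Int) ∧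
      dp.getD c 0 = depthF parent i)

-- the parent list grows by one entry per element
lemma pass1_parent_length : ∀ (s : List Int) (j : Int) (last parent : List (Option Int)),
    ((PySem.List.enumerate s j).foldl pass1Step (last, parent)).2.length
      = parent.length + s.length := by
  intro s
  induction s with
  | nil => intro j last parent; simp [PySem.List.enumerate]
  | cons x s' ih =>
    intro j last parent
    rw [PySem.List.enumerate_cons, List.foldl_cons, ih]
    have h1 : (pass1Step (last, parent) (j, x)).2.length = parent.length + 1 := by
      simp [pass1Step]
    rw [h1]
    simp
    omega

-- joint invariant over A's pass and B's first pass: B's final forest is backward and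
-- A's final maximum is the maximum depthF over all positions of B's final forest
lemma pass1_inv (n : Int) (hn : 1 ≤ n) :
    ∀ (s : List Int), (∀ x ∈ s, 2 - n ≤ x ∧ x ≤ n) →
    ∀ (dp : List Int) (m : Int) (last parent : List (Option Int)),
    (dp.length : Int) = n → (last.length : Int) = n →
    Backward parent →
    CellInv n dp last parent →
    m = (List.range parent.length).foldl (fun acc i => max acc (depthF parent i)) 1 →
    Backward ((PySem.List.enumerate s (parent.length : Int)).foldl pass1Step (last, parent)).2 ∧
    (s.foldl solveStepA (dp, m)).2
      = (List.range ((PySem.List.enumerate s (parent.length : Int)).foldl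
            pass1Step (last, parent)).2.length).foldl
          (fun acc i =>
            max acc (depthF ((PySem.List.enumerate s (parent.length : Int)).foldl
              pass1Step (last, parent)).2 i)) 1 := by
  intro s
  induction s with
  | nil =>
    intro _ dp m last parent _ _ hB hcell hm
    refine ⟨hB, ?_⟩
    simpa [PySem.List.enumerate] using hm
  | cons x s' ih =>
    intro hbd dp m last parent hdlen hllen hB hcell hm
    obtain ⟨hxlo, hxhi⟩ := hbd x (by simp)
    have hm1 : 1 ≤ m := by
      rw [hm]
      exact (PySem.List.le_foldl_max_int (List.range parent.length) (depthF parent) 1).1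
    set c1 := (PySem.Int.mod (x - 1) n).toNat with hc1
    set c0 := (PySem.Int.mod (x - 2) n).toNat with hc0
    have hc1lt : c1 < n.toNat := pymod_lt (x - 1) n hn
    have hc0lt : c0 < n.toNat := pymod_lt (x - 2) n hn
    -- the new parent entry and the value A writes
    set e : Option Int := if x ≠ 1 then last.getD c0 none else none with he
    set P' : List (Option Int) := parent ++ [e] with hP'
    have hgetP'_old : ∀ k, k < parent.length → P'.getD k none = parent.getD k none := by
      intro k hk
      rw [hP', List.getD_eq_getElem?_getD, List.getElem?_append_left hk,
        ← List.getD_eq_getElem?_getD]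
    have hgetP'_new : P'.getD parent.length none = e := by
      rw [hP', List.getD_eq_getElem?_getD, List.getElem?_append_right (le_refl _)]
      simp
    have hB' : Backward P' := by
      intro k p hp
      by_cases hk : k < parent.length
      · exact hB k p (by rw [← hgetP'_old k hk]; exact hp)
      · by_cases hk2 : k = parent.length
        · subst hk2
          rw [hgetP'_new] at hp
          rw [he] at hp
          split_ifs at hp with hx1
          rcases hcell c0 hc0lt with ⟨h1, _⟩ | ⟨i, hi, h1, _⟩
          · rw [h1] at hp; cases hp
          · rw [h1] at hp
            cases hp
            constructor
            · omega
            · simp only [Int.toNat_natCast]; omega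
        · exfalso
          have : P'.getD k none = none := by
            rw [List.getD_eq_getElem?_getD, List.getElem?_eq_none]
            · rfl
            · rw [hP']; simp; omega
          rw [this] at hp; cases hp
    have hdF_old : ∀ i, i < parent.length → depthF P' i = depthF parent i :=
      depthF_append parent [e] hB
    -- one step of B
    have hstepB : pass1Step (last, parent) ((parent.length : Int), x)
        = (last.set c1 (some (parent.length : Int)), P') := by
      unfold pass1Step
      simp only []
      rw [pySetD_mod last n (x - 1) _ hllen hn (by omega) (by omega), ← hc1, hP', he]
      by_cases hx1 : x = 1
      · rw [if_neg (not_not_intro hx1), if_neg (not_not_intro hx1)]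
      · rw [if_pos hx1, if_pos hx1,
          pyGetD_mod last none n (x - 2) hllen hn (by omega) (by omega), ← hc0]
    -- the value A writes equals the depth of the new node
    have hread : PySem.List.pyGetD dp (x - 1 - 1) 0 = dp.getD c0 0 := by
      have hxe : x - 1 - 1 = x - 2 := by ring
      rw [hxe, pyGetD_mod dp 0 n (x - 2) hdlen hn (by omega) (by omega), ← hc0]
    have hwrite : ∀ u : Int, PySem.List.pySetD dp (x - 1) u = dp.set c1 u := fun u => by
      rw [pySetD_mod dp n (x - 1) u hdlen hn (by omega) (by omega), ← hc1]
    set v : Int := depthF P' parent.length with hv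
    have hstepA : solveStepA (dp, m) x = (dp.set c1 v, if x ≠ 1 ∧ dp.getD c0 0 > 0 then max m v else m) := by
      unfold solveStepA
      simp only []
      by_cases hcond : x - 1 ≠ 0 ∧ PySem.List.pyGetD dp (x - 1 - 1) 0 > 0
      · have hx1 : x ≠ 1 := by intro h; subst h; simp at hcond
        have hdp0 : dp.getD c0 0 > 0 := by rw [← hread]; exact hcond.2
        rcases hcell c0 hc0lt with ⟨_, h2⟩ | ⟨i, hi, h1, h2⟩
        · rw [h2] at hdp0; omega
        · have hpe : P'.getD parent.length none = some (i : Int) := by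
            rw [hgetP'_new, he, if_pos hx1, h1]
          have hvval : v = depthF parent i + 1 := by
            rw [hv, depthF_some P' parent.length (i : Int) hpe,
              if_pos (by simp only [Int.toNat_natCast]; omega)]
            simp only [Int.toNat_natCast]
            rw [hdF_old i hi]
          rw [if_pos hcond, hread, hwrite, if_pos ⟨hx1, hdp0⟩, h2, hvval]
      · have hcnd2 : ¬ (x ≠ 1 ∧ dp.getD c0 0 > 0) := by
          intro hc
          exact hcond ⟨by omega, by rw [hread]; exact hc.2⟩
        have hvval : v = 1 := by
          rw [hv]
          by_cases hx1 : x = 1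
          · exact depthF_none P' parent.length
              (by rw [hgetP'_new, he, if_neg (not_not_intro hx1)])
          · rcases hcell c0 hc0lt with ⟨h1, _⟩ | ⟨i, hi, h1, h2⟩
            · exact depthF_none P' parent.length (by rw [hgetP'_new, he, if_pos hx1, h1])
            · exfalso
              apply hcnd2
              refine ⟨hx1, ?_⟩
              rw [h2]
              have := depthF_pos parent i
              omega
        rw [if_neg hcond, hwrite, if_neg hcnd2, hvval]
    -- the new running maximum
    have hmnew : (if x ≠ 1 ∧ dp.getD c0 0 > 0 then max m v else m)
        = (List.range P'.length).foldl (fun acc i => max acc (depthF P' i)) 1 := by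
      have hPlen : P'.length = parent.length + 1 := by rw [hP']; simp
      rw [hPlen, List.range_succ, List.foldl_append, List.foldl_cons, List.foldl_nil]
      have hfold : (List.range parent.length).foldl (fun acc i => max acc (depthF P' i)) 1
          = (List.range parent.length).foldl (fun acc i => max acc (depthF parent i)) 1 := by
        apply PySem.List.foldl_congr_mem
        intro acc i hi
        rw [hdF_old i (List.mem_range.mp hi)]
      rw [hfold, ← hm, ← hv]
      by_cases hc : x ≠ 1 ∧ dp.getD c0 0 > 0
      · rw [if_pos hc]
      · rw [if_neg hc]
        have hv1 : v = 1 := by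
          rw [hv]
          by_cases hx1 : x = 1
          · exact depthF_none P' parent.length
              (by rw [hgetP'_new, he, if_neg (not_not_intro hx1)])
          · rcases hcell c0 hc0lt with ⟨h1, _⟩ | ⟨i, hi, h1, h2⟩
            · exact depthF_none P' parent.length (by rw [hgetP'_new, he, if_pos hx1, h1])
            · exfalso
              apply hc
              refine ⟨hx1, ?_⟩
              rw [h2]
              have := depthF_pos parent i
              omega
        rw [hv1, max_eq_left hm1]
    -- the new cell invariant
    have hcell' : CellInv n (dp.set c1 v) (last.set c1 (some (parent.length : Int))) P' := by
      intro c hc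
      by_cases hcc : c = c1
      · subst hcc
        right
        refine ⟨parent.length, by rw [hP']; simp, ?_, ?_⟩
        · rw [List.getD_eq_getElem?_getD, List.getElem?_set_self (by omega), Option.getD_some]
        · rw [List.getD_eq_getElem?_getD, List.getElem?_set_self (by omega), Option.getD_some, hv]
      · have hg1 : (last.set c1 (some (parent.length : Int))).getD c none = last.getD c none := by
          rw [List.getD_eq_getElem?_getD, List.getElem?_set_ne (fun h => hcc h.symm),
            ← List.getD_eq_getElem?_getD]
        have hg2 : (dp.set c1 v).getD c 0 = dp.getD c 0 := by
          rw [List.getD_eq_getElem?_getD, List.getElem?_set_ne (fun h => hcc h.symm),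
            ← List.getD_eq_getElem?_getD]
        rcases hcell c hc with ⟨h1, h2⟩ | ⟨i, hi, h1, h2⟩
        · left; exact ⟨by rw [hg1, h1], by rw [hg2, h2]⟩
        · right
          refine ⟨i, by rw [hP']; simp; omega, by rw [hg1, h1], ?_⟩
          rw [hg2, h2, hdF_old i hi]
    -- recurse
    rw [PySem.List.enumerate_cons, List.foldl_cons, List.foldl_cons, hstepB, hstepA]
    have hjnext : (parent.length : Int) + 1 = (P'.length : Int) := by rw [hP']; simp
    rw [hjnext]
    exact ih (fun z hz => hbd z (by simp [hz])) (dp.set c1 v) _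
      (last.set c1 (some (parent.length : Int))) P'
      (by simpa using hdlen) (by simpa using hllen) hB' hcell' hmnew

-- B's second pass computes exactly the depth list and its running maximum
lemma pass2_eq (P : List (Option Int)) (hB : Backward P) :
    ∀ (N : Nat), N ≤ P.length →
    (PySem.List.pyRange 0 (N : Int) 1).foldl (pass2Step P) ([], 1)
      = ((List.range N).map (depthF P),
         (List.range N).foldl (fun acc i => max acc (depthF P i)) 1) := by
  intro N
  induction N with
  | zero =>
    intro _
    rw [PySem.List.pyRange_one_eq_nil (by omega)]
    simp
  | succ N ihN =>
    intro hle
    have hsplit : PySem.List.pyRange 0 (((N + 1 : Nat) : Nat) : Int) 1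
        = PySem.List.pyRange 0 (N : Int) 1 ++ [(N : Int)] := by
      rw [show (((N + 1 : Nat) : Nat) : Int) = (N : Int) + 1 by push_cast; ring]
      exact PySem.List.pyRange_one_succ_right (by omega)
    rw [hsplit, List.foldl_append, ihN (by omega), List.foldl_cons, List.foldl_nil]
    unfold pass2Step
    simp only []
    have hget : PySem.List.pyGetD P ((N : Nat) : Int) none = P.getD N none :=
      PySem.List.pyGetD_natCast P N none
    rw [hget]
    have hd : (match P.getD N none with
        | none => (1 : Int)
        | some q => PySem.List.pyGetD ((List.range N).map (depthF P)) q 0 + 1) = depthF P N := by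
      cases hp : P.getD N none with
      | none => simp only []; rw [depthF_none P N hp]
      | some q =>
        have hb := hB N q hp
        simp only []
        rw [depthF_some P N q hp, if_pos hb.2]
        have hq : q = ((q.toNat : Nat) : Int) := by omega
        rw [hq, PySem.List.pyGetD_natCast]
        congr 1
        rw [List.getD_eq_getElem?_getD, List.getElem?_map, List.getElem?_range hb.2]
        rfl
    rw [hd]
    simp only [Prod.mk.injEq]
    constructor
    · rw [List.range_succ, List.map_append, List.map_singleton]
    · rw [List.range_succ, List.foldl_append, List.foldl_cons, List.foldl_nil]
      rcases lt_or_ge ((List.range N).foldl (fun acc i => max acc (depthF P i)) 1) (depthF P N)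
        with h | h
      · rw [if_pos h, max_eq_right h.le]
      · rw [if_neg (not_lt.mpr h), max_eq_left h]

-- ===== VERDICT (by name: the statement is the Claim_ definition above) =====
theorem solve_spec : Claim_equal_solve := by
  intro n a _ hpre
  unfold Spec_solve
  cases ha : a with
  | nil => rfl
  | cons z zs =>
    have hpre' : 1 ≤ n ∧ ∀ x ∈ a, 2 - n ≤ x ∧ x ≤ n := by
      rcases hpre with h | h
      · rw [ha] at h; cases h
      · exact h
    obtain ⟨hn, hbd⟩ := hpre'
    rw [← ha]
    unfold solve solve_alt
    simp only []
    have h0 : ((List.replicate n.toNat (none : Option Int)).length : Int) = n := by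
      simp; omega
    have hinv := pass1_inv n hn a hbd (List.replicate n.toNat (-1)) 1
      (List.replicate n.toNat none) []
      (by simp; omega) h0
      (by intro k p hp; rw [List.getD_eq_getElem?_getD] at hp; simp at hp)
      (by
        intro c hc
        left
        constructor
        · rw [List.getD_eq_getElem?_getD, List.getElem?_replicate, if_pos hc, Option.getD_some]
        · rw [List.getD_eq_getElem?_getD, List.getElem?_replicate, if_pos hc, Option.getD_some])
      (by simp)
    simp only [List.length_nil, Nat.cast_zero] at hinv
    obtain ⟨hBfin, hmfin⟩ := hinv
    set P : List (Option Int) :=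
      ((PySem.List.enumerate a 0).foldl pass1Step (List.replicate n.toNat none, [])).2 with hP
    have hPlen : P.length = a.length := by
      rw [hP, pass1_parent_length a 0 (List.replicate n.toNat none) []]
      simp
    have h2 := pass2_eq P hBfin a.length (by omega)
    rw [h2, ← hPlen, hmfin]
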